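-- pv_equiv track=rewrite | github.com/himitery/Algorithm | programmers/python/2025_프로그래머스_코드챌린지_1차_예선/비밀_코드_해독/main.py | solution
-- ===== SOURCE A (Python) =====
-- import itertools
-- from collections import deque
-- from typing import List
--
-- def solution(n: int, q: List[List[int]], ans: List[int]) -> int:
--     questions = [set(question) for question in q]
--     stack, count = deque([(0, set(), set())]), 0
--
--     while stack:
--         idx, secrets, ignored = stack.pop()
--         if len(secrets) > 5:
--             continue
--
--         if idx == len(questions):
--             if n - len(ignored) >= 5:
--                 count += len(
--                     list(
--                         itertools.combinations(
--                             {x + 1 for x in range(n)} - (secrets | ignored),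
--                             5 - len(secrets),
--                         )
--                     )
--                 )
--             continue
--
--         matched, available = questions[idx] & secrets, questions[idx] - (secrets | ignored)
--         if len(matched) == ans[idx]:
--             stack.append((idx + 1, secrets, ignored | available))
--             continue
--         if len(matched) > ans[idx] or len(available) < ans[idx] - len(matched):
--             continue
--
--         for new_secret in itertools.combinations(available, ans[idx] - len(matched)):
--             stack.append(
--                 (
--                     idx + 1,
--                     secrets | set(new_secret),
--                     ignored | (available - set(new_secret)),
--                 )
--             )
--
--     return count
-- ===== SOURCE B (Python) =====
-- import itertools
-- from math import comb
-- from typing import List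
--
--
-- def solution(n: int, q: List[List[int]], ans: List[int]) -> int:
--     pairs = [(set(question), a) for question, a in zip(q, ans)]
--
--     def rec(pairs, secrets, ignored):
--         if len(secrets) > 5:
--             return 0
--         if not pairs:
--             if n - len(ignored) >= 5:
--                 free = n - len({x for x in secrets | ignored if 1 <= x <= n})
--                 return comb(free, 5 - len(secrets))
--             return 0
--         (question, a), rest = pairs[0], pairs[1:]
--         matched = len(question & secrets)
--         available = question - secrets - ignored
--         need = a - matched
--         if need == 0:
--             return rec(rest, secrets, ignored | available)
--         if need < 0 or need > len(available):
--             return 0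
--         return sum(
--             rec(rest, secrets | set(c), ignored | (available - set(c)))
--             for c in itertools.combinations(available, need)
--         )
--
--     return rec(pairs, set(), set())
-- ===== Notes on version B (the rewrite author's own statement) =====
-- stated objective: alternative
-- what changed: Replaced the explicit-deque DFS that materialises every 5-code completion with itertools.combinations at each leaf by a recursive backtracking function over the remaining (question, answer) pairs that returns branch sums and counts leaf completions with a closed-form binomial coefficient math.comb (computed from n and the in-range ignored/secret codes, without building the {1..n} universe set), also folding A's matched==ans special case and its combinations branch into one 'need' computation.
-- outside the precondition, e.g. on solution(5, [[1], [2]], [3]): A returns 0, B returns 0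
import Mathlib
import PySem

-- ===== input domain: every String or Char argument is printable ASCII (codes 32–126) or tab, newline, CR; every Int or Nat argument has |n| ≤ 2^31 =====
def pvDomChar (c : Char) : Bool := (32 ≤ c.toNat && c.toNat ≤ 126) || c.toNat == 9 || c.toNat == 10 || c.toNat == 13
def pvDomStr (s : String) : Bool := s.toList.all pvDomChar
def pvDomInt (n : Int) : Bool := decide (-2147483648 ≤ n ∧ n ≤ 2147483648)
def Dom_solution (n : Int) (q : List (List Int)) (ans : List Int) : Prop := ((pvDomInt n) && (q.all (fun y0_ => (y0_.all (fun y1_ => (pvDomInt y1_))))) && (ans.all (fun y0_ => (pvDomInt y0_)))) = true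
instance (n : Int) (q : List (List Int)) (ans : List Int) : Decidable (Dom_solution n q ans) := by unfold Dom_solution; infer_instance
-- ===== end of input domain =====

-- B replaces A's explicit-deque DFS by recursive backtracking that returns the branch sums and counts
-- the leaf completions with a closed-form binomial coefficient instead of materialising every
-- combination of the remaining codes (objective: alternative decomposition of the same search).

-- ===== PORT A =====
-- {x+1 for x in range(n)}  (the same comprehension appears verbatim in A and in B)
def pvUniv (n : Int) : PySem.Set Int :=
  PySem.Set.ofList ((PySem.List.pyRange 0 n 1).map (· + 1))

-- list(itertools.combinations(xs, r)) has C(len(xs), r) elements (used by the termination measure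
-- of A's loop and by the leaf case of the equivalence proof)
lemma pv_length_combinations {α : Type} (xs : List α) (r : Nat) :
    (PySem.List.combinations xs r).length = xs.length.choose r := by
  induction xs generalizing r with
  | nil => cases r <;> simp [PySem.List.combinations_zero, PySem.List.combinations_nil_succ]
  | cons x t ih =>
    cases r with
    | zero => simp [PySem.List.combinations_zero]
    | succ r =>
      rw [PySem.List.combinations_cons_succ]
      simp [ih, Nat.choose_succ_succ]

-- bound used only for the termination measure of the stack loop
def pvMaxQ (questions : List (PySem.Set Int)) : Nat :=
  questions.foldl (fun acc l => max acc l.length) 0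

-- the `while stack:` loop of A; stack head = top (deque.pop / append on the right).
-- `questions[idx]? = none` is impossible for reachable states (idx ≤ len(questions)): totality guard.
-- `ans.getD idx 0`: Python's ans[idx], IndexError when idx ≥ len(ans) — excluded by Pre_solution.
def pvLoopA (n : Int) (questions : List (PySem.Set Int)) (ans : List Int)
    (stack : List (Nat × PySem.Set Int × PySem.Set Int)) (count : Int) : Int :=
  match stack with
  | [] => count
  | (idx, secrets, ignored) :: rest =>
    if secrets.length > 5 then
      pvLoopA n questions ans rest count
    else if idx = questions.length then
      pvLoopA n questions ans rest
        (if n - PySem.Set.len ignored ≥ 5 then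
          count + ((PySem.List.combinations
            (PySem.Set.diff (pvUniv n) (PySem.Set.union secrets ignored))
            (5 - secrets.length)).length : Int)
        else count)
    else
      -- locals of the Python body (a = ans[idx], matched, available) are written out in full here
      match hq : questions[idx]? with
      | none => pvLoopA n questions ans rest count
      | some qi =>
        if PySem.Set.len (PySem.Set.inter qi secrets) = ans.getD idx 0 then
          pvLoopA n questions ans ((idx + 1, secrets,
            PySem.Set.union ignored (PySem.Set.diff qi (PySem.Set.union secrets ignored))) :: rest) count
        else if PySem.Set.len (PySem.Set.inter qi secrets) > ans.getD idx 0 ∨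
            PySem.Set.len (PySem.Set.diff qi (PySem.Set.union secrets ignored)) <
              ans.getD idx 0 - PySem.Set.len (PySem.Set.inter qi secrets) then
          pvLoopA n questions ans rest count
        else
          pvLoopA n questions ans
            (((PySem.List.combinations (PySem.Set.diff qi (PySem.Set.union secrets ignored))
                (ans.getD idx 0 - PySem.Set.len (PySem.Set.inter qi secrets)).toNat).map
              (fun c => (idx + 1, PySem.Set.union secrets (PySem.Set.ofList c),
                PySem.Set.union ignored (PySem.Set.diff
                  (PySem.Set.diff qi (PySem.Set.union secrets ignored)) (PySem.Set.ofList c))))) ++ rest)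
            count
  termination_by (stack.map (fun it =>
    (2 ^ pvMaxQ questions + 1) ^ (questions.length + 1 - it.1))).sum
  decreasing_by
  · simp only [List.map_cons, List.sum_cons]
    have := Nat.pow_pos (n := questions.length + 1 - idx)
      (by positivity : 0 < 2 ^ pvMaxQ questions + 1)
    omega
  · simp only [List.map_cons, List.sum_cons]
    have := Nat.pow_pos (n := questions.length + 1 - idx)
      (by positivity : 0 < 2 ^ pvMaxQ questions + 1)
    omega
  · simp only [List.map_cons, List.sum_cons]
    have := Nat.pow_pos (n := questions.length + 1 - idx)
      (by positivity : 0 < 2 ^ pvMaxQ questions + 1)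
    omega
  · simp only [List.map_cons, List.sum_cons]
    obtain ⟨hidx, -⟩ := List.getElem?_eq_some_iff.mp hq
    have hK : 1 < 2 ^ pvMaxQ questions + 1 := by
      have := Nat.pow_pos (n := pvMaxQ questions) (by omega : 0 < 2); omega
    have := Nat.pow_lt_pow_right hK (by omega :
      questions.length + 1 - (idx + 1) < questions.length + 1 - idx)
    omega
  · simp only [List.map_cons, List.sum_cons]
    have := Nat.pow_pos (n := questions.length + 1 - idx)
      (by positivity : 0 < 2 ^ pvMaxQ questions + 1)
    omega
  · simp only [List.map_append, List.sum_append, List.map_map, List.map_cons, List.sum_cons,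
      Function.comp_def]
    obtain ⟨hidx, hget⟩ := List.getElem?_eq_some_iff.mp hq
    set K := 2 ^ pvMaxQ questions + 1 with hK
    set combs := PySem.List.combinations (qi.diff (secrets.union ignored))
      (ans.getD idx 0 - (qi.inter secrets).len).toNat with hcombs
    have hmap : (combs.map fun _ => K ^ (questions.length + 1 - (idx + 1))) =
        List.replicate combs.length (K ^ (questions.length + 1 - (idx + 1))) :=
      List.map_const' ..
    rw [hmap, List.sum_replicate, smul_eq_mul]
    -- combs.length < K
    have hqm : qi.length ≤ pvMaxQ questions := by
      have hmem : qi ∈ questions := by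
        rw [← hget]; exact List.getElem_mem hidx
      exact (PySem.List.le_foldl_max_nat questions List.length 0).2 qi hmem
    have hav : (qi.diff (secrets.union ignored)).length ≤ qi.length :=
      List.length_filter_le _ _
    have hlen : combs.length < K := by
      rw [hcombs, pv_length_combinations]
      calc (qi.diff (secrets.union ignored)).length.choose _
          ≤ 2 ^ (qi.diff (secrets.union ignored)).length := Nat.choose_le_two_pow _ _
        _ ≤ 2 ^ pvMaxQ questions := Nat.pow_le_pow_right (by omega) (le_trans hav hqm)
        _ < K := by omega
    have hexp : questions.length + 1 - idx = (questions.length + 1 - (idx + 1)) + 1 := by omega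
    have hpos := Nat.pow_pos (n := questions.length + 1 - (idx + 1))
      (by positivity : 0 < 2 ^ pvMaxQ questions + 1)
    have : combs.length * K ^ (questions.length + 1 - (idx + 1)) <
        K ^ (questions.length + 1 - idx) := by
      rw [hexp, pow_succ]
      calc combs.length * K ^ (questions.length + 1 - (idx + 1))
          < K * K ^ (questions.length + 1 - (idx + 1)) :=
            Nat.mul_lt_mul_of_lt_of_le hlen (le_refl _) (by omega)
        _ = K ^ (questions.length + 1 - (idx + 1)) * K := Nat.mul_comm _ _
    omega

def solution (n : Int) (q : List (List Int)) (ans : List Int) : Int :=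
  pvLoopA n (q.map PySem.Set.ofList) ans [(0, PySem.Set.empty, PySem.Set.empty)] 0

-- ===== PORT B =====
-- recursive backtracking over the remaining (question, answer) pairs, returning the count
def pvRecB (n : Int) (pairs : List (PySem.Set Int × Int))
    (secrets ignored : PySem.Set Int) : Int :=
  if secrets.length > 5 then 0
  else
    match pairs with
    | [] =>
      -- free = n - len({x for x in secrets | ignored if 1 <= x <= n}); math.comb = Nat.choose
      -- (free is provably ≥ 0 here, so .toNat is exact and Python's comb never raises)
      if n - PySem.Set.len ignored ≥ 5 then
        ((n - PySem.Set.len (PySem.Set.ofList ((PySem.Set.union secrets ignored).filter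
            (fun x => decide (1 ≤ x) && decide (x ≤ n))))).toNat.choose
          (5 - secrets.length) : Int)
      else 0
    | (question, a) :: rest =>
      let matched := PySem.Set.len (PySem.Set.inter question secrets)
      let available := PySem.Set.diff (PySem.Set.diff question secrets) ignored
      let need := a - matched
      if need = 0 then
        pvRecB n rest secrets (PySem.Set.union ignored available)
      else if need < 0 ∨ PySem.Set.len available < need then 0
      else
        ((PySem.List.combinations available need.toNat).map
          (fun c => pvRecB n rest (PySem.Set.union secrets (PySem.Set.ofList c))
            (PySem.Set.union ignored (PySem.Set.diff available (PySem.Set.ofList c))))).sum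

def solution_alt (n : Int) (q : List (List Int)) (ans : List Int) : Int :=
  pvRecB n ((q.zip ans).map (fun p => (PySem.Set.ofList p.1, p.2)))
    PySem.Set.empty PySem.Set.empty

-- ===== PRECONDITION & SPEC =====
-- Pre_ requires at least as many answers as questions: when ans is shorter, A raises IndexError on any
-- branch that reaches a question without an answer (and returns only when every branch happens to be
-- pruned before that point).
def Pre_solution (n : Int) (q : List (List Int)) (ans : List Int) : Prop :=
  q.length ≤ ans.length
instance (n : Int) (q : List (List Int)) (ans : List Int) : Decidable (Pre_solution n q ans) := by
  unfold Pre_solution; infer_instance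

def pvWitness_solution : Int × List (List Int) × List Int := (10, [[1, 2, 3], [4, 5]], [1, 1])

def Spec_solution (n : Int) (q : List (List Int)) (ans : List Int) (out : Int) : Prop := out = solution_alt n q ans
instance (n : Int) (q : List (List Int)) (ans : List Int) (out : Int) : Decidable (Spec_solution n q ans out) := by unfold Spec_solution; infer_instance

-- ===== CLAIM (what is proved, stated in full; the proofs are below) =====
def Claim_equal_solution : Prop := ∀ (n : Int) (q : List (List Int)) (ans : List Int), Dom_solution n q ans → Pre_solution n q ans → Spec_solution n q ans (solution n q ans)

-- ===== LEMMAS AND PROOFS =====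

-- the value a stack item still contributes: B's backtracking on the remaining pairs
def pvNode (n : Int) (pairs : List (PySem.Set Int × Int))
    (it : Nat × PySem.Set Int × PySem.Set Int) : Int :=
  if it.1 ≤ pairs.length then pvRecB n (pairs.drop it.1) it.2.1 it.2.2 else 0

lemma pv_diff_union (x s g : PySem.Set Int) :
    PySem.Set.diff x (PySem.Set.union s g) = PySem.Set.diff (PySem.Set.diff x s) g := by
  simp only [PySem.Set.diff, PySem.Set.union, List.filter_filter]
  apply List.filter_congr
  intro y _
  simp [PySem.Set.mem_update, Bool.and_comm]

-- the number of still-free codes: |{1..n} - (secrets|ignored)| = n - #(distinct in-range members)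
lemma pv_free_len (n : Int) (u : List Int) :
    (PySem.Set.diff (pvUniv n) u).length
      = (n - PySem.Set.len (PySem.Set.ofList (u.filter
          (fun x => decide (1 ≤ x) && decide (x ≤ n))))).toNat := by
  have hU : pvUniv n = (PySem.List.pyRange 0 n 1).map (· + 1) := by
    unfold pvUniv
    exact PySem.Set.ofList_eq_self_of_nodup _
      ((PySem.List.nodup_pyRange_one 0 n).map (fun a b hab => by omega))
  have hlenU : (pvUniv n).length = n.toNat := by
    rw [hU, List.length_map, PySem.List.length_pyRange_one]
    simp
  have hmemU : ∀ x : Int, x ∈ pvUniv n ↔ 1 ≤ x ∧ x ≤ n := by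
    intro x
    rw [hU]
    simp only [List.mem_map, PySem.List.mem_pyRange_one]
    constructor
    · rintro ⟨a, ⟨h1, h2⟩, rfl⟩; omega
    · rintro ⟨h1, h2⟩; exact ⟨x - 1, ⟨by omega, by omega⟩, by omega⟩
  have hnodupU : (pvUniv n).Nodup := by
    rw [hU]
    exact (PySem.List.nodup_pyRange_one 0 n).map (fun a b hab => by omega)
  have hsplit := List.length_eq_length_filter_add (l := pvUniv n)
    (f := fun x => u.contains x)
  have hperm : ((pvUniv n).filter (fun x => u.contains x)).Perm
      (PySem.Set.ofList (u.filter (fun x => decide (1 ≤ x) && decide (x ≤ n)))) := by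
    rw [List.perm_ext_iff_of_nodup (hnodupU.filter _) (PySem.Set.nodup_ofList _)]
    intro x
    rw [PySem.Set.mem_ofList]
    simp only [List.mem_filter, hmemU, List.contains_iff_mem, decide_eq_true_eq,
      Bool.and_eq_true]
    tauto
  have hle : ((pvUniv n).filter (fun x => u.contains x)).length ≤ n.toNat := by
    rw [← hlenU]; exact List.length_filter_le _ _
  have hdiff : (PySem.Set.diff (pvUniv n) u).length
      = (pvUniv n).length - ((pvUniv n).filter (fun x => u.contains x)).length := by
    unfold PySem.Set.diff
    simp only [PySem.Set.contains_eq_listContains]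
    omega
  rw [hdiff, hlenU]
  unfold PySem.Set.len
  rw [← hperm.length_eq]
  omega

lemma pvRecB_prune (n : Int) (pairs : List (PySem.Set Int × Int))
    (s g : PySem.Set Int) (h5 : s.length > 5) : pvRecB n pairs s g = 0 := by
  rw [pvRecB.eq_def]
  cases pairs <;> simp [h5]

lemma pvNode_prune (n : Int) (pairs : List (PySem.Set Int × Int))
    (it : Nat × PySem.Set Int × PySem.Set Int) (h5 : it.2.1.length > 5) :
    pvNode n pairs it = 0 := by
  unfold pvNode
  split
  · exact pvRecB_prune _ _ _ _ h5
  · rfl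

lemma pv_zip_drop (questions : List (PySem.Set Int)) (ans : List Int)
    (h : questions.length ≤ ans.length) (idx : Nat) (qi : PySem.Set Int)
    (hq : questions[idx]? = some qi) :
    (questions.zip ans).drop idx
      = (qi, ans.getD idx 0) :: (questions.zip ans).drop (idx + 1) := by
  obtain ⟨hidx, hget⟩ := List.getElem?_eq_some_iff.mp hq
  have hlt : idx < (questions.zip ans).length := by
    rw [List.length_zip]; omega
  rw [List.drop_eq_getElem_cons hlt]
  congr 1
  rw [List.getElem_zip, hget, List.getD_eq_getElem ans 0 (by omega)]

lemma pvNode_step (n : Int) (pairs : List (PySem.Set Int × Int)) (idx : Nat)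
    (qi : PySem.Set Int) (a : Int) (s g : PySem.Set Int)
    (hidx : idx < pairs.length)
    (hp : pairs.drop idx = (qi, a) :: pairs.drop (idx + 1)) :
    pvNode n pairs (idx, s, g) =
      if s.length > 5 then 0
      else if a - PySem.Set.len (PySem.Set.inter qi s) = 0 then
        pvNode n pairs (idx + 1, s,
          PySem.Set.union g (PySem.Set.diff (PySem.Set.diff qi s) g))
      else if a - PySem.Set.len (PySem.Set.inter qi s) < 0 ∨
          PySem.Set.len (PySem.Set.diff (PySem.Set.diff qi s) g)
            < a - PySem.Set.len (PySem.Set.inter qi s) then 0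
      else ((PySem.List.combinations (PySem.Set.diff (PySem.Set.diff qi s) g)
          (a - PySem.Set.len (PySem.Set.inter qi s)).toNat).map
        (fun c => pvNode n pairs (idx + 1, PySem.Set.union s (PySem.Set.ofList c),
          PySem.Set.union g (PySem.Set.diff
            (PySem.Set.diff (PySem.Set.diff qi s) g) (PySem.Set.ofList c))))).sum := by
  have h1 : idx + 1 ≤ pairs.length := hidx
  unfold pvNode
  rw [if_pos (Nat.le_of_lt hidx), hp, pvRecB.eq_def]
  simp only [if_pos h1]

lemma pvLoop_eq (n : Int) (questions : List (PySem.Set Int)) (ans : List Int)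
    (h : questions.length ≤ ans.length)
    (stack : List (Nat × PySem.Set Int × PySem.Set Int)) (count : Int) :
    pvLoopA n questions ans stack count
      = count + (stack.map (pvNode n ((questions.zip ans)))).sum := by
  have hplen : (questions.zip ans).length = questions.length := by
    rw [List.length_zip]; omega
  fun_induction pvLoopA n questions ans stack count with
  | case1 count => simp
  | case2 count idx secrets ignored rest h5 ih =>
    rw [ih, List.map_cons, List.sum_cons, pvNode_prune n _ _ h5]
    ring
  | case3 count secrets ignored rest h5 ih =>
    simp only [dite_eq_ite] at ih
    rw [ih, List.map_cons, List.sum_cons]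
    have hnode : pvNode n (questions.zip ans) (questions.length, secrets, ignored)
        = if n - PySem.Set.len ignored ≥ 5 then
            (((n - PySem.Set.len (PySem.Set.ofList ((PySem.Set.union secrets ignored).filter
                (fun x => decide (1 ≤ x) && decide (x ≤ n))))).toNat.choose
              (5 - secrets.length) : Nat) : Int)
          else 0 := by
      unfold pvNode
      rw [if_pos (by omega : questions.length ≤ (questions.zip ans).length),
        List.drop_eq_nil_of_le (by omega), pvRecB.eq_def]
      simp [h5]
    rw [hnode, pv_length_combinations, pv_free_len n (secrets.union ignored)]
    split_ifs <;> ring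
  | case4 count idx secrets ignored rest h5 hne hq ih =>
    have hgt : (questions.zip ans).length < idx := by
      have := List.getElem?_eq_none_iff.mp hq
      omega
    rw [ih, List.map_cons, List.sum_cons]
    unfold pvNode
    rw [if_neg (by omega)]
    ring
  | case5 count idx secrets ignored rest h5 hne qi hq hm ih =>
    have hidx : idx < (questions.zip ans).length := by
      have := (List.getElem?_eq_some_iff.mp hq).1
      omega
    have hp := pv_zip_drop questions ans h idx qi hq
    rw [ih, List.map_cons, List.sum_cons, List.map_cons, List.sum_cons,
      pvNode_step n (questions.zip ans) idx qi (ans.getD idx 0) secrets ignored hidx hp,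
      if_neg h5, if_pos (by omega : ans.getD idx 0 - PySem.Set.len (qi.inter secrets) = 0),
      pv_diff_union qi secrets ignored]
  | case6 count idx secrets ignored rest h5 hne qi hq hm hcond ih =>
    have hidx : idx < (questions.zip ans).length := by
      have := (List.getElem?_eq_some_iff.mp hq).1
      omega
    have hp := pv_zip_drop questions ans h idx qi hq
    rw [pv_diff_union qi secrets ignored] at hcond
    rw [ih, List.map_cons, List.sum_cons,
      pvNode_step n (questions.zip ans) idx qi (ans.getD idx 0) secrets ignored hidx hp,
      if_neg h5,
      if_neg (by omega : ¬(ans.getD idx 0 - PySem.Set.len (qi.inter secrets) = 0)),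
      if_pos (by omega :
        ans.getD idx 0 - PySem.Set.len (qi.inter secrets) < 0 ∨
          PySem.Set.len (PySem.Set.diff (PySem.Set.diff qi secrets) ignored)
            < ans.getD idx 0 - PySem.Set.len (qi.inter secrets))]
    ring
  | case7 count idx secrets ignored rest h5 hne qi hq hm hcond ih =>
    have hidx : idx < (questions.zip ans).length := by
      have := (List.getElem?_eq_some_iff.mp hq).1
      omega
    have hp := pv_zip_drop questions ans h idx qi hq
    rw [pv_diff_union qi secrets ignored] at hcond
    rw [ih, List.map_append, List.sum_append, List.map_cons, List.sum_cons,
      pv_diff_union qi secrets ignored,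
      pvNode_step n (questions.zip ans) idx qi (ans.getD idx 0) secrets ignored hidx hp,
      if_neg h5,
      if_neg (by omega : ¬(ans.getD idx 0 - PySem.Set.len (qi.inter secrets) = 0)),
      if_neg (by omega :
        ¬(ans.getD idx 0 - PySem.Set.len (qi.inter secrets) < 0 ∨
          PySem.Set.len (PySem.Set.diff (PySem.Set.diff qi secrets) ignored)
            < ans.getD idx 0 - PySem.Set.len (qi.inter secrets)))]
    simp only [List.map_map, Function.comp_def]

-- ===== VERDICT (by name: the statement is the Claim_ definition above) =====
theorem solution_spec : Claim_equal_solution := by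
  intro n q ans _ hpre
  unfold Spec_solution solution solution_alt
  rw [pvLoop_eq n _ ans (by simpa using hpre)]
  simp only [List.map_cons, List.map_nil, List.sum_cons, List.sum_nil, pvNode,
    List.length_zip, List.length_map, List.drop_zero]
  rw [if_pos (by omega)]
  rw [List.zip_map_left]
  simp [Prod.map_def]
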